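-- pv_equiv track=rewrite | github.com/hwmaltby/project-euler | problems/problem_86.py | create_cuboids
-- ===== SOURCE A (Python) =====
-- def count_cuboids(a, b, m):
--     """
--     Returns the number of cuboids that have all sides <= m, one equal
--     to max(a, b), and the other two summing to min(a, b).
--     """
--     a, b = min(a, b), max(a, b)
--     if a > m or b > 2 * m:
--         return 0
--     if b > m:
--         if (b + 1) // 2 > a:
--             return 0
--         return (a - ((b - 1) // 2))
--     total = 0
--     if (b + 1) // 2 <= a:
--         total += (a - ((b - 1) // 2))
--     total += (a // 2)
--     return total
--
-- def create_cuboids(k):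
--     """
--     Returns the number of cuboids that have all sides <= k, integer
--     side lengths, and an integer long diagonal length.
--     """
--     pythag_triplets = set()
--     for m in range(2, k + 1):
--         for n in range(1, min(k // m + 2, m)):
--             a = m * m - n * n
--             b = 2 * m * n
--             c = m * m + n * n
--             mult = 1
--             while mult * m * n <= k:
--                 triple = (mult * a, mult * b, mult * c)
--                 triple2 = (mult * b, mult * a, mult * c)
--                 if triple2 not in pythag_triplets:
--                     pythag_triplets.add(triple)
--                 mult += 1
--     total = 0
--     for triple in pythag_triplets:
--         total += count_cuboids(triple[0], triple[1], k)
--     return total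
-- ===== SOURCE B (Python) =====
-- def create_cuboids(k):
--     divs = [[] for _ in range(k + 1)]
--     for d in range(1, k + 1):
--         for mlt in range(d, k + 1, d):
--             divs[mlt].append(d)
--     total = 0
--     for a in range(1, k + 1):
--         for d in {u * v for u in divs[a] for v in divs[a]}:
--             e = a * a // d
--             if d < e and (e - d) % 2 == 0:
--                 bc = (e - d) // 2
--                 if 2 <= bc <= 2 * a:
--                     total += bc // 2 if bc <= a else a - (bc - 1) // 2
--     return total
-- ===== Notes on version B (the rewrite author's own statement) =====
-- stated objective: faster
-- what changed: Replaces the Euclid (m,n,mult) triple generation with a swap-deduplicating set and per-triple counting by a factor-pair method: a divisor sieve, then for each largest side a every divisor d of a*a with d < a*a//d and matching parity yields the partner sum bc=(a*a//d-d)//2 directly, counted inline.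
import Mathlib
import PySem

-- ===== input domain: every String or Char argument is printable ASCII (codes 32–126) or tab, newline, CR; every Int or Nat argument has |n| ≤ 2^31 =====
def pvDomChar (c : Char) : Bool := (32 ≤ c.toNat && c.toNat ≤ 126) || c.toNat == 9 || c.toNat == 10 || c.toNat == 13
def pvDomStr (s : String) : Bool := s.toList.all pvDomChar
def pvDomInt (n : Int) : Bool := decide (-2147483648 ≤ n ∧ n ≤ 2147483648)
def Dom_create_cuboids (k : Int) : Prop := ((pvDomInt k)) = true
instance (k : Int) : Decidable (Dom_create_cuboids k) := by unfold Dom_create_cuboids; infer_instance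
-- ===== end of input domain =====

-- B replaces A's Euclid-parametrization triple generation (plus swap-deduplicating set
-- and per-triple counting) by a divisor sieve and a factor-pair scan of a*a per largest
-- side a, counted inline; the return values are proved equal for every k.

-- ===== PORT A =====

-- count_cuboids, transliterated
def pv_count_cuboids (a b m : Int) : Int :=
  let a' := min a b
  let b' := max a b
  if a' > m ∨ b' > 2 * m then 0
  else if b' > m then
    if PySem.Int.floordiv (b' + 1) 2 > a' then 0
    else a' - PySem.Int.floordiv (b' - 1) 2
  else
    let total : Int := 0
    let total := if PySem.Int.floordiv (b' + 1) 2 ≤ a' then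
        total + (a' - PySem.Int.floordiv (b' - 1) 2) else total
    total + PySem.Int.floordiv a' 2

-- the inner 'while mult * m * n <= k' loop; fuel bounds the iteration count
-- (fuel = k.toNat + 1 at the call site always suffices: each iteration requires
--  mult * m * n ≤ k with m * n ≥ 2 and mult ≥ 1, so at most k/2 iterations run)
def pv_multLoop (k a b c m n : Int) (mult : Int)
    (S : PySem.Set (Int × Int × Int)) : Nat → PySem.Set (Int × Int × Int)
  | 0 => S
  | fuel + 1 =>
    if mult * m * n ≤ k then
      let triple := (mult * a, mult * b, mult * c)
      let triple2 := (mult * b, mult * a, mult * c)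
      let S' := if ¬ (PySem.Set.contains S triple2) then PySem.Set.add S triple else S
      pv_multLoop k a b c m n (mult + 1) S' fuel
    else S

def create_cuboids (k : Int) : Int :=
  let S : PySem.Set (Int × Int × Int) := PySem.Set.empty
  let S := (PySem.List.pyRange 2 (k + 1) 1).foldl (fun S m =>
    (PySem.List.pyRange 1 (min (PySem.Int.floordiv k m + 2) m) 1).foldl (fun S n =>
      let a := m * m - n * n
      let b := 2 * m * n
      let c := m * m + n * n
      pv_multLoop k a b c m n 1 S (k.toNat + 1)) S) S
  S.foldl (fun total t => total + pv_count_cuboids t.1 t.2.1 k) 0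

-- ===== PORT B =====

def create_cuboids_alt (k : Int) : Int :=
  let divs : List (List Int) := (PySem.List.pyRange 0 (k + 1) 1).map (fun _ => ([] : List Int))
  let divs := (PySem.List.pyRange 1 (k + 1) 1).foldl (fun divs d =>
    (PySem.List.pyRange d (k + 1) d).foldl (fun divs mlt =>
      PySem.List.pySetD divs mlt (PySem.List.pyGetD divs mlt [] ++ [d])) divs) divs
  (PySem.List.pyRange 1 (k + 1) 1).foldl (fun total a =>
    (PySem.Set.ofList ((PySem.List.pyGetD divs a []).flatMap (fun u =>
      (PySem.List.pyGetD divs a []).map (fun v => u * v)))).foldl (fun total d =>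
      let e := PySem.Int.floordiv (a * a) d
      if d < e ∧ PySem.Int.mod (e - d) 2 = 0 then
        let bc := PySem.Int.floordiv (e - d) 2
        if 2 ≤ bc ∧ bc ≤ 2 * a then
          total + (if bc ≤ a then PySem.Int.floordiv bc 2
                   else a - PySem.Int.floordiv (bc - 1) 2)
        else total
      else total) total) 0

-- ===== PRECONDITION & SPEC =====
def Spec_create_cuboids (k : Int) (out : Int) : Prop := out = create_cuboids_alt k
instance (k : Int) (out : Int) : Decidable (Spec_create_cuboids k out) := by unfold Spec_create_cuboids; infer_instance

-- ===== CLAIM (what is proved, stated in full; the proofs are below) =====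
def Claim_equal_create_cuboids : Prop := ∀ (k : Int), Dom_create_cuboids k → Spec_create_cuboids k (create_cuboids k)

-- ===== LEMMAS AND PROOFS =====

-- ---------- basic arithmetic facts ----------

-- there is no integer square root of 2 (descent); specific form needed below
theorem pv_sqrt2_nat : ∀ x y : ℕ, x * x = 2 * (y * y) → y = 0 := by
  intro x
  induction x using Nat.strong_induction_on with
  | _ x ih =>
    intro y h
    by_contra hy
    have hy1 : 1 ≤ y := Nat.one_le_iff_ne_zero.mpr hy
    have hdvd : 2 ∣ x := by
      have h2 : 2 ∣ x * x := ⟨y * y, h⟩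
      rcases (Nat.prime_two.dvd_mul).mp h2 with h3 | h3 <;> exact h3
    obtain ⟨x', rfl⟩ := hdvd
    have e : (2 * x') * (2 * x') = 4 * (x' * x') := by ring
    have h' : y * y = 2 * (x' * x') := by linarith
    have hlt : y < 2 * x' := by nlinarith
    have hz := ih y hlt x' h'
    subst hz
    simp at h'
    omega

theorem pv_sqrt2 (x y : Int) (hy : 1 ≤ y) : x * x ≠ 2 * (y * y) := by
  intro h
  have hN : x.natAbs * x.natAbs = 2 * (y.natAbs * y.natAbs) := by
    have h1 := congrArg Int.natAbs h
    simpa [Int.natAbs_mul] using h1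
  have := pv_sqrt2_nat _ _ hN
  omega

-- ---------- proof-side vocabulary ----------

def pvSwap (t : Int × Int × Int) : Int × Int × Int := (t.2.1, t.1, t.2.2)

def pvTri (m n mult : Int) : Int × Int × Int :=
  (mult * (m * m - n * n), mult * (2 * m * n), mult * (m * m + n * n))

def pvGen (k m n mult : Int) : Prop :=
  2 ≤ m ∧ 1 ≤ n ∧ n < m ∧ 1 ≤ mult ∧ mult * m * n ≤ k

def pvElt (k : Int) (t : Int × Int × Int) : Prop :=
  ∃ m n mult, pvGen k m n mult ∧ (t = pvTri m n mult ∨ t = pvSwap (pvTri m n mult))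

def pvInv (k : Int) (S : List (Int × Int × Int)) : Prop :=
  (∀ t ∈ S, pvElt k t) ∧ (∀ t ∈ S, pvSwap t ∉ S) ∧ S.Nodup

abbrev pvSqP (k v : Int) : Prop := ∃ c ∈ PySem.List.pyRange 1 (3 * k + 1) 1, c * c = v

def pvF (s t : Int) : Int := if t ≤ s then t / 2 else s - (t - 1) / 2

def pvT (k s t : Int) : Int :=
  if 1 ≤ s ∧ s ≤ k ∧ 2 ≤ t ∧ t ≤ 2 * s ∧ pvSqP k (s * s + t * t) then pvF s t else 0

def pvNStep (k m : Int) (S : PySem.Set (Int × Int × Int)) (n : Int) : PySem.Set (Int × Int × Int) :=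
  pv_multLoop k (m * m - n * n) (2 * m * n) (m * m + n * n) m n 1 S (k.toNat + 1)

def pvMStep (k : Int) (S : PySem.Set (Int × Int × Int)) (m : Int) : PySem.Set (Int × Int × Int) :=
  (PySem.List.pyRange 1 (min (PySem.Int.floordiv k m + 2) m) 1).foldl (pvNStep k m) S

def pvS (k : Int) : PySem.Set (Int × Int × Int) :=
  (PySem.List.pyRange 2 (k + 1) 1).foldl (pvMStep k) PySem.Set.empty

def pvM (k : Int) : List (Int × Int) :=
  (pvS k).map (fun t => (t.1, t.2.1)) ++ (pvS k).map (fun t => (t.2.1, t.1))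

theorem pvSwap_swap (t : Int × Int × Int) : pvSwap (pvSwap t) = t := by
  obtain ⟨a, b, c⟩ := t; rfl

-- ---------- facts about generated triples ----------

theorem pvTri_legs (k m n mult : Int) (h : pvGen k m n mult) :
    3 ≤ mult * (m * m - n * n) ∧ 4 ≤ mult * (2 * m * n) ∧
    mult * (m * m - n * n) ≠ mult * (2 * m * n) ∧
    (mult * (m * m - n * n)) * (mult * (m * m - n * n)) +
      (mult * (2 * m * n)) * (mult * (2 * m * n)) =
      (mult * (m * m + n * n)) * (mult * (m * m + n * n)) ∧
    1 ≤ mult * (m * m + n * n) := by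
  obtain ⟨hm, hn, hnm, hmu, _⟩ := h
  have h1 : m + n ≥ 3 := by omega
  have h2 : m - n ≥ 1 := by omega
  have h3 : m * m - n * n = (m - n) * (m + n) := by ring
  have hA : 3 ≤ m * m - n * n := by nlinarith
  have hB : 4 ≤ 2 * m * n := by nlinarith
  have hC : 1 ≤ m * m + n * n := by nlinarith
  refine ⟨?_, ?_, ?_, by ring, ?_⟩
  · exact le_trans hA (le_mul_of_one_le_left (by omega) hmu)
  · exact le_trans hB (le_mul_of_one_le_left (by omega) hmu)
  · intro heq
    have hc := mul_left_cancel₀ (by omega : mult ≠ 0) heq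
    have h4 : (m - n) * (m - n) = 2 * (n * n) := by nlinarith
    exact pv_sqrt2 (m - n) n hn h4
  · exact le_trans hC (le_mul_of_one_le_left (by omega) hmu)

theorem pvElt_facts (k : Int) (t : Int × Int × Int) (h : pvElt k t) :
    3 ≤ t.1 ∧ 3 ≤ t.2.1 ∧ t.1 ≠ t.2.1 ∧ 1 ≤ t.2.2 ∧
    t.1 * t.1 + t.2.1 * t.2.1 = t.2.2 * t.2.2 := by
  obtain ⟨m, n, mult, hg, hor⟩ := h
  have L := pvTri_legs k m n mult hg
  obtain ⟨L1, L2, L3, L4, L5⟩ := L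
  rcases hor with rfl | rfl <;> dsimp only [pvTri, pvSwap]
  · exact ⟨L1, by omega, L3, L5, L4⟩
  · exact ⟨by omega, L1, fun hh => L3 hh.symm, L5, by linarith⟩

-- ---------- count_cuboids characterization ----------

theorem pv_count_comm (a b m : Int) : pv_count_cuboids a b m = pv_count_cuboids b a m := by
  unfold pv_count_cuboids
  rw [min_comm, max_comm]

theorem pv_count_eq_of_lt (k p q : Int) (hp : 3 ≤ p) (hpq : p < q)
    (hpy : ∃ c, 1 ≤ c ∧ p * p + q * q = c * c) :
    pv_count_cuboids p q k = pvT k p q + pvT k q p := by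
  obtain ⟨c, hc1, hcc⟩ := hpy
  have hmin : min p q = p := min_eq_left hpq.le
  have hmax : max p q = q := max_eq_right hpq.le
  unfold pv_count_cuboids
  rw [hmin, hmax]
  simp only [PySem.Int.floordiv_eq_ediv_of_pos (show (0:Int) < 2 by norm_num)]
  by_cases hpk : p ≤ k
  · by_cases hq2k : q ≤ 2 * k
    · have hk1 : (1 : Int) ≤ k := by omega
      have hc3 : c ≤ 3 * k := by nlinarith
      have hs1 : pvSqP k (p * p + q * q) := ⟨c, PySem.List.mem_pyRange_one.mpr ⟨hc1, by omega⟩, hcc.symm⟩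
      have hs2 : pvSqP k (q * q + p * p) := ⟨c, PySem.List.mem_pyRange_one.mpr ⟨hc1, by omega⟩, by linarith⟩
      have e1 : pvT k p q = if q ≤ 2 * p then p - (q - 1) / 2 else 0 := by
        unfold pvT pvF
        by_cases h2p : q ≤ 2 * p
        · rw [if_pos ⟨by omega, hpk, by omega, h2p, hs1⟩, if_neg (by omega), if_pos h2p]
        · rw [if_neg (fun hh => h2p hh.2.2.2.1), if_neg h2p]
      have e2 : pvT k q p = if q ≤ k then p / 2 else 0 := by
        unfold pvT pvF
        by_cases hqk : q ≤ k
        · rw [if_pos ⟨by omega, hqk, by omega, by omega, hs2⟩, if_pos (by omega), if_pos hqk]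
        · rw [if_neg (fun hh => hqk hh.2.1), if_neg hqk]
      rw [e1, e2]
      split_ifs <;> omega
    · have e1 : pvT k p q = 0 := by
        unfold pvT; rw [if_neg]; rintro ⟨h1, h2, h3, h4, h5⟩; omega
      have e2 : pvT k q p = 0 := by
        unfold pvT; rw [if_neg]; rintro ⟨h1, h2, h3, h4, h5⟩; omega
      rw [e1, e2, if_pos (Or.inr (by omega))]
      norm_num
  · have e1 : pvT k p q = 0 := by
      unfold pvT; rw [if_neg]; rintro ⟨h1, h2, h3, h4, h5⟩; omega
    have e2 : pvT k q p = 0 := by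
      unfold pvT; rw [if_neg]; rintro ⟨h1, h2, h3, h4, h5⟩; omega
    rw [e1, e2, if_pos (Or.inl (by omega))]
    norm_num

theorem pv_count_eq (k p q : Int) (hp : 3 ≤ p) (hq : 3 ≤ q) (hne : p ≠ q)
    (hpy : ∃ c, 1 ≤ c ∧ p * p + q * q = c * c) :
    pv_count_cuboids p q k = pvT k p q + pvT k q p := by
  rcases lt_trichotomy p q with h | h | h
  · exact pv_count_eq_of_lt k p q hp h hpy
  · exact absurd h hne
  · obtain ⟨c, hc1, hcc⟩ := hpy
    rw [pv_count_comm, add_comm]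
    exact pv_count_eq_of_lt k q p hq h ⟨c, hc1, by linarith⟩

-- ---------- the while loop ----------

theorem pv_multLoop_mono (k a b c m n : Int) :
    ∀ (fuel : Nat) (mult : Int) (S : PySem.Set (Int × Int × Int)) (x : Int × Int × Int),
      x ∈ S → x ∈ pv_multLoop k a b c m n mult S fuel := by
  intro fuel
  induction fuel with
  | zero => intro mult S x hx; simpa [pv_multLoop] using hx
  | succ f ih =>
    intro mult S x hx
    simp only [pv_multLoop]
    split
    · apply ih
      split
      · exact (PySem.Set.mem_add _ _ _).mpr (Or.inl hx)
      · exact hx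
    · exact hx

theorem pv_multLoop_inv (k m n : Int) (hm : 2 ≤ m) (hn : 1 ≤ n) (hnm : n < m) :
    ∀ (fuel : Nat) (mult : Int), 1 ≤ mult → ∀ S, pvInv k S →
      pvInv k (pv_multLoop k (m * m - n * n) (2 * m * n) (m * m + n * n) m n mult S fuel) := by
  intro fuel
  induction fuel with
  | zero => intro mult _ S hS; simpa [pv_multLoop] using hS
  | succ f ih =>
    intro mult hmult S hS
    simp only [pv_multLoop]
    split
    · rename_i hcond
      apply ih (mult + 1) (by omega)
      split
      · rename_i hnm2
        have hGen : pvGen k m n mult := ⟨hm, hn, hnm, hmult, hcond⟩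
        have L := pvTri_legs k m n mult hGen
        have hnotmem : (mult * (2 * m * n), mult * (m * m - n * n), mult * (m * m + n * n)) ∉ S := by
          intro hmem
          exact hnm2 (by simpa [PySem.Set.contains_iff] using hmem)
        obtain ⟨hElt, hSw, hNd⟩ := hS
        refine ⟨?_, ?_, PySem.Set.nodup_add _ _ hNd⟩
        · intro t ht
          rcases (PySem.Set.mem_add _ _ _).mp ht with ht' | rfl
          · exact hElt t ht'
          · exact ⟨m, n, mult, hGen, Or.inl rfl⟩
        · intro t ht hsw
          rcases (PySem.Set.mem_add _ _ _).mp ht with ht' | rfl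
          · rcases (PySem.Set.mem_add _ _ _).mp hsw with hsw' | hsw'
            · exact hSw t ht' hsw'
            · apply hnotmem
              have : t = pvSwap (mult * (m * m - n * n), mult * (2 * m * n), mult * (m * m + n * n)) := by
                rw [← hsw', pvSwap_swap]
              rw [this] at ht'
              simpa [pvSwap] using ht'
          · rcases (PySem.Set.mem_add _ _ _).mp hsw with hsw' | hsw'
            · exact hnotmem (by simpa [pvSwap] using hsw')
            · have : mult * (m * m - n * n) = mult * (2 * m * n) := congrArg Prod.fst hsw'.symm
              exact L.2.2.1 this
      · exact hS
    · exact hS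

theorem pv_multLoop_reach (k m n : Int) (hm : 2 ≤ m) (hn : 1 ≤ n) (_hnm : n < m) :
    ∀ (fuel : Nat) (mult mult' : Int) (S : PySem.Set (Int × Int × Int)),
      1 ≤ mult → mult ≤ mult' → mult' * m * n ≤ k → mult' - mult < (fuel : Int) →
      pvTri m n mult' ∈ pv_multLoop k (m * m - n * n) (2 * m * n) (m * m + n * n) m n mult S fuel ∨
      pvSwap (pvTri m n mult') ∈ pv_multLoop k (m * m - n * n) (2 * m * n) (m * m + n * n) m n mult S fuel := by
  intro fuel
  induction fuel with
  | zero => intro mult mult' S _ hle _ hf; exfalso; simp at hf; omega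
  | succ f ih =>
    intro mult mult' S hmult hle hbound hf
    have hmn0 : (0:Int) ≤ m * n := by nlinarith
    have hmono : mult * (m * n) ≤ mult' * (m * n) := mul_le_mul_of_nonneg_right hle hmn0
    have hcond : mult * m * n ≤ k := by
      have e1 : mult * m * n = mult * (m * n) := by ring
      have e2 : mult' * m * n = mult' * (m * n) := by ring
      linarith
    simp only [pv_multLoop]
    rw [if_pos hcond]
    by_cases heq : mult = mult'
    · subst heq
      by_cases hct : PySem.Set.contains S (mult * (2 * m * n), mult * (m * m - n * n), mult * (m * m + n * n)) = true
      · right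
        have hmem : pvSwap (pvTri m n mult) ∈ S := by
          have := (PySem.Set.contains_iff _ _).mp hct
          simpa [pvSwap, pvTri] using this
        apply pv_multLoop_mono
        split
        · exact (PySem.Set.mem_add _ _ _).mpr (Or.inl hmem)
        · exact hmem
      · left
        apply pv_multLoop_mono
        split
        · exact (PySem.Set.mem_add _ _ _).mpr (Or.inr rfl)
        · rename_i hns
          exact absurd (by simpa using hct) hns
    · dsimp only
      exact ih (mult + 1) mult' _ (by omega) (by omega) hbound (by omega)

-- ---------- the two nested for loops ----------

theorem pv_nfold_mono (k m : Int) :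
    ∀ (l : List Int) (S : PySem.Set (Int × Int × Int)) (x : Int × Int × Int),
      x ∈ S → x ∈ l.foldl (pvNStep k m) S := by
  intro l
  induction l with
  | nil => intro S x hx; simpa using hx
  | cons a l ih =>
    intro S x hx
    exact ih _ x (pv_multLoop_mono k _ _ _ m a _ 1 S x hx)

theorem pv_mfold_mono (k : Int) :
    ∀ (l : List Int) (S : PySem.Set (Int × Int × Int)) (x : Int × Int × Int),
      x ∈ S → x ∈ l.foldl (pvMStep k) S := by
  intro l
  induction l with
  | nil => intro S x hx; simpa using hx
  | cons a l ih =>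
    intro S x hx
    exact ih _ x (pv_nfold_mono k a _ _ x hx)

theorem pv_nfold_inv (k m : Int) (hm : 2 ≤ m) :
    ∀ (l : List Int) (S : PySem.Set (Int × Int × Int)),
      (∀ n ∈ l, 1 ≤ n ∧ n < m) → pvInv k S → pvInv k (l.foldl (pvNStep k m) S) := by
  intro l
  induction l with
  | nil => intro S _ hS; simpa using hS
  | cons a l ih =>
    intro S hl hS
    obtain ⟨ha1, ham⟩ := hl a List.mem_cons_self
    exact ih _ (fun n hn => hl n (List.mem_cons_of_mem a hn))
      (pv_multLoop_inv k m a hm ha1 ham _ 1 le_rfl S hS)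

theorem pv_mfold_inv (k : Int) :
    ∀ (l : List Int) (S : PySem.Set (Int × Int × Int)),
      (∀ m ∈ l, 2 ≤ m) → pvInv k S → pvInv k (l.foldl (pvMStep k) S) := by
  intro l
  induction l with
  | nil => intro S _ hS; simpa using hS
  | cons a l ih =>
    intro S hl hS
    have ha : 2 ≤ a := hl a List.mem_cons_self
    apply ih _ (fun m hmm => hl m (List.mem_cons_of_mem a hmm))
    apply pv_nfold_inv k a ha _ S ?_ hS
    intro n hn
    have := PySem.List.mem_pyRange_one.mp hn
    exact ⟨this.1, lt_of_lt_of_le this.2 (min_le_right _ _)⟩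

theorem pvS_inv (k : Int) : pvInv k (pvS k) := by
  apply pv_mfold_inv
  · intro m hm
    exact (PySem.List.mem_pyRange_one.mp hm).1
  · exact ⟨by simp [PySem.Set.empty], by simp [PySem.Set.empty], by simp [PySem.Set.empty]⟩

theorem pv_nfold_reach (k m n mult : Int) (hm : 2 ≤ m) (hn : 1 ≤ n) (hnm : n < m)
    (hmult : 1 ≤ mult) (hbound : mult * m * n ≤ k) :
    ∀ (l : List Int) (S : PySem.Set (Int × Int × Int)), n ∈ l →
      pvTri m n mult ∈ l.foldl (pvNStep k m) S ∨ pvSwap (pvTri m n mult) ∈ l.foldl (pvNStep k m) S := by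
  intro l
  induction l with
  | nil => intro S hmem; exact absurd hmem (List.not_mem_nil)
  | cons a l ih =>
    intro S hmem
    rcases List.mem_cons.mp hmem with rfl | hmem'
    · have hmn2 : (2:Int) ≤ m * n := by nlinarith
      have e1 : mult * m * n = mult * (m * n) := by ring
      have hmul1 : mult ≤ mult * (m * n) := le_mul_of_one_le_right (by omega) (by omega)
      have hmul2 : m * n ≤ mult * (m * n) := le_mul_of_one_le_left (by omega) hmult
      have hkmult : mult ≤ k := by linarith
      have hk2 : (2 : Int) ≤ k := by linarith
      have hfuel : mult - 1 < ((k.toNat + 1 : Nat) : Int) := by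
        push_cast
        rw [Int.toNat_of_nonneg (by omega)]
        omega
      have hreach := pv_multLoop_reach k m n hm hn hnm (k.toNat + 1) 1 mult S (le_refl 1) hmult hbound hfuel
      rcases hreach with h | h
      · exact Or.inl (pv_nfold_mono k m l _ _ h)
      · exact Or.inr (pv_nfold_mono k m l _ _ h)
    · exact ih _ hmem'

theorem pv_mfold_reach (k m n mult : Int) (hGen : pvGen k m n mult) :
    ∀ (l : List Int) (S : PySem.Set (Int × Int × Int)), m ∈ l →
      pvTri m n mult ∈ l.foldl (pvMStep k) S ∨ pvSwap (pvTri m n mult) ∈ l.foldl (pvMStep k) S := by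
  obtain ⟨hm, hn, hnm, hmult, hbound⟩ := hGen
  intro l
  induction l with
  | nil => intro S hmem; exact absurd hmem (List.not_mem_nil)
  | cons a l ih =>
    intro S hmem
    rcases List.mem_cons.mp hmem with rfl | hmem'
    · have hnmem : n ∈ PySem.List.pyRange 1 (min (PySem.Int.floordiv k m + 2) m) 1 := by
        apply PySem.List.mem_pyRange_one.mpr
        refine ⟨hn, lt_min ?_ hnm⟩
        have hnk : n * m ≤ k := by
          have hmn2 : (2:Int) ≤ m * n := by nlinarith
          have e1 : mult * m * n = mult * (m * n) := by ring
          have hmul2 : m * n ≤ mult * (m * n) := le_mul_of_one_le_left (by omega) hmult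
          linarith
        have := (PySem.Int.le_floordiv_iff_mul_le (by omega : (0:Int) < m)).mpr hnk
        omega
      have hreach := pv_nfold_reach k m n mult hm hn hnm hmult hbound _ S hnmem
      rcases hreach with h | h
      · exact Or.inl (pv_mfold_mono k l _ _ h)
      · exact Or.inr (pv_mfold_mono k l _ _ h)
    · exact ih _ hmem'

theorem pvS_reach (k m n mult : Int) (hGen : pvGen k m n mult) :
    pvTri m n mult ∈ pvS k ∨ pvSwap (pvTri m n mult) ∈ pvS k := by
  apply pv_mfold_reach k m n mult hGen
  apply PySem.List.mem_pyRange_one.mpr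
  obtain ⟨hm, hn, hnm, hmult, hbound⟩ := hGen
  constructor
  · exact hm
  · have hnm1 : (1:Int) ≤ n * mult := by nlinarith
    have e1 : mult * m * n = m * (n * mult) := by ring
    have h1 : m ≤ m * (n * mult) := le_mul_of_one_le_right (by omega) hnm1
    linarith

-- ---------- completeness: every counted pair is generated ----------

theorem pv_norm (K m n X Y : Int) (hK : 0 < K) (hX1 : 1 ≤ X) (hY1 : 1 ≤ Y)
    (hX : X = K * (m ^ 2 - n ^ 2)) (hY : Y = K * (2 * m * n)) :
    ∃ M N, 1 ≤ N ∧ N < M ∧ X = K * (M * M - N * N) ∧ Y = K * (2 * M * N) ∧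
      2 * (K * M * N) = Y := by
  have h2 : 0 < m * n := by nlinarith
  have h1 : n * n < m * m := by nlinarith
  have hmne : m ≠ 0 := by rintro rfl; simp at h2
  have hnne : n ≠ 0 := by rintro rfl; simp at h2
  have habs : |m| * |n| = m * n := by rw [← abs_mul, abs_of_pos h2]
  refine ⟨|m|, |n|, ?_, ?_, ?_, ?_, ?_⟩
  · have := abs_pos.mpr hnne
    omega
  · nlinarith [abs_mul_abs_self m, abs_mul_abs_self n, abs_nonneg m, abs_nonneg n]
  · rw [abs_mul_abs_self, abs_mul_abs_self, hX]; ring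
  · rw [show K * (2 * |m| * |n|) = 2 * K * (|m| * |n|) by ring, habs, hY]; ring
  · rw [show 2 * (K * |m| * |n|) = 2 * K * (|m| * |n|) by ring, habs, hY]; ring

theorem pv_complete (k s t c : Int) (hs1 : 1 ≤ s) (hsk : s ≤ k) (ht2 : 2 ≤ t)
    (ht2s : t ≤ 2 * s) (_hc1 : 1 ≤ c) (hcc : s * s + t * t = c * c) :
    ∃ m n mult, pvGen k m n mult ∧
      ((s = mult * (m * m - n * n) ∧ t = mult * (2 * m * n)) ∨
       (s = mult * (2 * m * n) ∧ t = mult * (m * m - n * n))) := by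
  have hPT : PythagoreanTriple s t c := hcc
  obtain ⟨K, m, n, hleg, _⟩ := PythagoreanTriple.classification.mp hPT
  rcases hleg with ⟨hs, ht⟩ | ⟨hs, ht⟩
  · -- s is the odd-form leg, t the even-form leg
    have hK0 : K ≠ 0 := by rintro rfl; simp at hs; omega
    rcases lt_or_gt_of_ne hK0 with hKneg | hKpos
    · obtain ⟨M, N, hN1, hNM, hXe, hYe, hYb⟩ :=
        pv_norm (-K) n (-m) s t (by omega) (by omega) (by omega)
          (by rw [hs]; ring) (by rw [ht]; ring)
      refine ⟨M, N, -K, ⟨by omega, hN1, hNM, by omega, by linarith⟩, Or.inl ⟨hXe, hYe⟩⟩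
    · obtain ⟨M, N, hN1, hNM, hXe, hYe, hYb⟩ :=
        pv_norm K m n s t hKpos (by omega) (by omega) hs ht
      refine ⟨M, N, K, ⟨by omega, hN1, hNM, by omega, by linarith⟩, Or.inl ⟨hXe, hYe⟩⟩
  · -- s is the even-form leg, t the odd-form leg
    have hK0 : K ≠ 0 := by rintro rfl; simp at ht; omega
    rcases lt_or_gt_of_ne hK0 with hKneg | hKpos
    · obtain ⟨M, N, hN1, hNM, hXe, hYe, hYb⟩ :=
        pv_norm (-K) n (-m) t s (by omega) (by omega) (by omega)
          (by rw [ht]; ring) (by rw [hs]; ring)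
      have hb : -K * M * N ≤ k := by
        have hKMN : 1 ≤ -K * M * N := by nlinarith
        omega
      exact ⟨M, N, -K, ⟨by omega, hN1, hNM, by omega, hb⟩, Or.inr ⟨hYe, hXe⟩⟩
    · obtain ⟨M, N, hN1, hNM, hXe, hYe, hYb⟩ :=
        pv_norm K m n t s hKpos (by omega) (by omega) ht hs
      have hb : K * M * N ≤ k := by
        have hKMN : 1 ≤ K * M * N := by nlinarith
        omega
      exact ⟨M, N, K, ⟨by omega, hN1, hNM, by omega, hb⟩, Or.inr ⟨hYe, hXe⟩⟩

-- ---------- the list of recorded pairs ----------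

theorem pvT_ne_zero_guard {k s t : Int} (h : pvT k s t ≠ 0) :
    1 ≤ s ∧ s ≤ k ∧ 2 ≤ t ∧ t ≤ 2 * s ∧ pvSqP k (s * s + t * t) := by
  by_contra hc
  exact h (by unfold pvT; rw [if_neg hc])

theorem pv_third_unique (c c' v : Int) (h : c * c = v) (h' : c' * c' = v)
    (h1 : 1 ≤ c) (h1' : 1 ≤ c') : c = c' := by
  rcases mul_self_eq_mul_self_iff.mp (h.trans h'.symm) with hh | hh <;> omega

theorem pvM_nodup (k : Int) : (pvM k).Nodup := by
  obtain ⟨hElt, hSw, hNd⟩ := pvS_inv k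
  have key : ∀ x ∈ pvS k, ∀ y ∈ pvS k, x.1 = y.1 → x.2.1 = y.2.1 → x = y := by
    intro x hx y hy h1 h2
    have fx := pvElt_facts k x (hElt x hx)
    have fy := pvElt_facts k y (hElt y hy)
    have h3 : x.2.2 = y.2.2 := by
      apply pv_third_unique _ _ (x.1 * x.1 + x.2.1 * x.2.1) fx.2.2.2.2.symm _ fx.2.2.2.1 fy.2.2.2.1
      rw [h1, h2]; exact fy.2.2.2.2.symm
    obtain ⟨a, b, c⟩ := x; obtain ⟨a', b', c'⟩ := y
    simp_all
  apply List.Nodup.append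
  · apply List.Nodup.map_on _ hNd
    intro x hx y hy hxy
    obtain ⟨h1, h2⟩ := Prod.ext_iff.mp hxy
    exact key x hx y hy h1 h2
  · apply List.Nodup.map_on _ hNd
    intro x hx y hy hxy
    obtain ⟨h1, h2⟩ := Prod.ext_iff.mp hxy
    exact key x hx y hy h2 h1
  · intro p hp1 hp2
    obtain ⟨e, he, hpe⟩ := List.mem_map.mp hp1
    obtain ⟨e', he', hpe'⟩ := List.mem_map.mp hp2
    have hpp : (e.1, e.2.1) = (e'.2.1, e'.1) := by rw [hpe, hpe']
    obtain ⟨h1, h2⟩ := Prod.ext_iff.mp hpp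
    have fe := pvElt_facts k e (hElt e he)
    have fe' := pvElt_facts k e' (hElt e' he')
    have h3 : e'.2.2 = e.2.2 := by
      dsimp only at h1 h2
      apply pv_third_unique _ _ (e.1 * e.1 + e.2.1 * e.2.1) ?_ fe.2.2.2.2.symm fe'.2.2.2.1 fe.2.2.2.1
      rw [h1, h2]; linarith [fe'.2.2.2.2]
    have : pvSwap e' = e := by
      obtain ⟨a, b, c⟩ := e; obtain ⟨a', b', c'⟩ := e'
      simp_all [pvSwap]
    exact hSw e' he' (this ▸ he)

theorem pvM_filter (k : Int) :
    (pvM k).toFinset.filter (fun x => pvT k x.1 x.2 ≠ 0) =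
      (Finset.Icc (1:Int) k ×ˢ Finset.Icc (2:Int) (2 * k)).filter (fun x => pvT k x.1 x.2 ≠ 0) := by
  obtain ⟨hElt, hSw, hNd⟩ := pvS_inv k
  ext x
  obtain ⟨s, t⟩ := x
  simp only [Finset.mem_filter, List.mem_toFinset, Finset.mem_product, Finset.mem_Icc]
  constructor
  · rintro ⟨hx, hne⟩
    have g := pvT_ne_zero_guard hne
    exact ⟨⟨⟨g.1, g.2.1⟩, g.2.2.1, by omega⟩, hne⟩
  · rintro ⟨hmem, hne⟩
    refine ⟨?_, hne⟩
    have g := pvT_ne_zero_guard hne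
    obtain ⟨c, hcI, hccv⟩ := g.2.2.2.2
    obtain ⟨hcl, hcu⟩ := PySem.List.mem_pyRange_one.mp hcI
    obtain ⟨m, n, mult, hGen, hor⟩ :=
      pv_complete k s t c g.1 g.2.1 g.2.2.1 g.2.2.2.1 hcl hccv.symm
    have hreach := pvS_reach k m n mult hGen
    have hmemM : ∀ e ∈ pvS k, (e.1 = s ∧ e.2.1 = t) ∨ (e.2.1 = s ∧ e.1 = t) → (s, t) ∈ pvM k := by
      intro e he hcase
      unfold pvM
      rcases hcase with ⟨h1, h2⟩ | ⟨h1, h2⟩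
      · exact List.mem_append_left _ (List.mem_map.mpr ⟨e, he, by rw [h1, h2]⟩)
      · exact List.mem_append_right _ (List.mem_map.mpr ⟨e, he, by rw [h1, h2]⟩)
    rcases hreach with hin | hin
    · rcases hor with ⟨h1, h2⟩ | ⟨h1, h2⟩
      · exact hmemM _ hin (Or.inl ⟨h1.symm, h2.symm⟩)
      · exact hmemM _ hin (Or.inr ⟨h1.symm, h2.symm⟩)
    · rcases hor with ⟨h1, h2⟩ | ⟨h1, h2⟩
      · exact hmemM _ hin (Or.inr ⟨by simp [pvSwap, pvTri, h1.symm], by simp [pvSwap, pvTri, h2.symm]⟩)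
      · exact hmemM _ hin (Or.inl ⟨by simp [pvSwap, pvTri, h1.symm], by simp [pvSwap, pvTri, h2.symm]⟩)

-- ---------- pyRange sums as Finset sums ----------

theorem pv_sum_range (f : Int → Int) (a b : Int) :
    ((PySem.List.pyRange a b 1).map f).sum = ∑ x ∈ Finset.Icc a (b - 1), f x := by
  rw [← List.sum_toFinset f (PySem.List.nodup_pyRange_one a b)]
  congr 1
  ext x
  simp only [List.mem_toFinset, PySem.List.mem_pyRange_one, Finset.mem_Icc]
  omega

-- ---------- the A side as a grid sum ----------

theorem pv_A_eq (k : Int) :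
    create_cuboids k = ∑ x ∈ Finset.Icc (1:Int) k ×ˢ Finset.Icc (2:Int) (2 * k), pvT k x.1 x.2 := by
  obtain ⟨hElt, hSw, hNd⟩ := pvS_inv k
  have step0 : create_cuboids k =
      (pvS k).foldl (fun total t => total + pv_count_cuboids t.1 t.2.1 k) 0 := rfl
  rw [step0, PySem.List.foldl_add (pvS k) (fun t => pv_count_cuboids t.1 t.2.1 k) 0, zero_add]
  have step1 : (pvS k).map (fun t => pv_count_cuboids t.1 t.2.1 k) =
      (pvS k).map (fun t => pvT k t.1 t.2.1 + pvT k t.2.1 t.1) := by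
    apply List.map_congr_left
    intro t ht
    have f := pvElt_facts k t (hElt t ht)
    exact pv_count_eq k t.1 t.2.1 f.1 f.2.1 f.2.2.1 ⟨t.2.2, f.2.2.2.1, f.2.2.2.2⟩
  rw [step1, PySem.List.sum_map_add_int]
  have step2 : (List.map (fun t => pvT k t.1 t.2.1) (pvS k)).sum +
      (List.map (fun t => pvT k t.2.1 t.1) (pvS k)).sum =
      ((pvM k).map (fun x => pvT k x.1 x.2)).sum := by
    unfold pvM
    rw [List.map_append, List.sum_append, List.map_map, List.map_map]
    rfl
  rw [step2, ← List.sum_toFinset _ (pvM_nodup k),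
      ← Finset.sum_filter_ne_zero ((pvM k).toFinset), pvM_filter k,
      Finset.sum_filter_ne_zero]

-- ---------- the B side as the same grid sum ----------

def pvDSieve (k : Int) : List (List Int) :=
  (PySem.List.pyRange 1 (k + 1) 1).foldl (fun divs d =>
    (PySem.List.pyRange d (k + 1) d).foldl (fun divs mlt =>
      PySem.List.pySetD divs mlt (PySem.List.pyGetD divs mlt [] ++ [d])) divs)
    ((PySem.List.pyRange 0 (k + 1) 1).map (fun _ => ([] : List Int)))

def pvDGet (k a : Int) : List Int := PySem.List.pyGetD (pvDSieve k) a []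

def pvProd (k a : Int) : PySem.Set Int :=
  PySem.Set.ofList ((pvDGet k a).flatMap (fun u => (pvDGet k a).map (fun v => u * v)))

def pvContrib (a d : Int) : Int :=
  let e := PySem.Int.floordiv (a * a) d
  if d < e ∧ PySem.Int.mod (e - d) 2 = 0 then
    let bc := PySem.Int.floordiv (e - d) 2
    if 2 ≤ bc ∧ bc ≤ 2 * a then
      (if bc ≤ a then PySem.Int.floordiv bc 2
       else a - PySem.Int.floordiv (bc - 1) 2)
    else 0
  else 0

def pvRoot (a bc : Int) : Int := ((a * a + bc * bc).toNat.sqrt : Int)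

-- a perfect-square test on a value in the scanned range agrees with pvSqP
theorem pv_sq_iff (k a bc : Int) (ha1 : 1 ≤ a) (hak : a ≤ k) (hbc2 : 2 ≤ bc)
    (hbc2a : bc ≤ 2 * a) :
    (∃ d, 1 ≤ d ∧ d * d = a * a + bc * bc) ↔ pvSqP k (a * a + bc * bc) := by
  constructor
  · rintro ⟨d, hd1, hdd⟩
    have hd3k : d ≤ 3 * k := by nlinarith
    exact ⟨d, PySem.List.mem_pyRange_one.mpr ⟨hd1, by omega⟩, hdd⟩
  · rintro ⟨d, hd, hdd⟩
    exact ⟨d, (PySem.List.mem_pyRange_one.mp hd).1, hdd⟩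

-- ----- the divisor sieve -----

theorem pv_getD_setD (xs : List (List Int)) (i j : Int) (v : List Int)
    (hi0 : 0 ≤ i) (hilen : i < (xs.length : Int)) (hj0 : 0 ≤ j) :
    PySem.List.pyGetD (PySem.List.pySetD xs i v) j [] =
      if j = i then v else PySem.List.pyGetD xs j [] := by
  have hi : i = ((i.toNat : Nat) : Int) := (Int.toNat_of_nonneg hi0).symm
  have hj : j = ((j.toNat : Nat) : Int) := (Int.toNat_of_nonneg hj0).symm
  rw [hi, hj, PySem.List.pyGetD_pySetD_natCast xs i.toNat j.toNat v [] (by omega)]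
  by_cases hji : j.toNat = i.toNat
  · rw [if_pos hji, if_pos (by omega : ((j.toNat : Nat) : Int) = ((i.toNat : Nat) : Int))]
  · rw [if_neg hji, if_neg (by omega : ¬ ((j.toNat : Nat) : Int) = ((i.toNat : Nat) : Int))]

theorem pv_inner_sieve_len (d : Int) :
    ∀ (l : List Int) (divs : List (List Int)),
      ((l.foldl (fun divs mlt =>
        PySem.List.pySetD divs mlt (PySem.List.pyGetD divs mlt [] ++ [d])) divs)).length =
      divs.length := by
  intro l
  induction l with
  | nil => intro divs; rfl
  | cons x l ih =>
    intro divs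
    rw [List.foldl_cons, ih, PySem.List.length_pySetD]

theorem pv_inner_sieve_get (d : Int) :
    ∀ (l : List Int) (divs : List (List Int)) (a : Int), l.Nodup →
      (∀ x ∈ l, 0 ≤ x ∧ x < (divs.length : Int)) → 0 ≤ a →
      PySem.List.pyGetD (l.foldl (fun divs mlt =>
          PySem.List.pySetD divs mlt (PySem.List.pyGetD divs mlt [] ++ [d])) divs) a [] =
        PySem.List.pyGetD divs a [] ++ (if a ∈ l then [d] else []) := by
  intro l
  induction l with
  | nil => intro divs a _ _ _; simp
  | cons x l ih =>
    intro divs a hnd hbound ha0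
    obtain ⟨hx0, hxlen⟩ := hbound x List.mem_cons_self
    rw [List.foldl_cons]
    rw [ih _ a (List.Nodup.of_cons hnd)
      (fun y hy => by
        have := hbound y (List.mem_cons_of_mem x hy)
        rwa [PySem.List.length_pySetD])
      ha0]
    rw [pv_getD_setD divs x a _ hx0 hxlen ha0]
    by_cases hax : a = x
    · subst hax
      have hal : a ∉ l := (List.nodup_cons.mp hnd).1
      rw [if_pos rfl, if_neg hal, if_pos List.mem_cons_self]
      simp
    · rw [if_neg hax]
      by_cases hal : a ∈ l
      · rw [if_pos hal, if_pos (List.mem_cons_of_mem x hal)]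
      · rw [if_neg hal, if_neg (by
          intro h
          rcases List.mem_cons.mp h with h | h
          · exact hax h
          · exact hal h)]

theorem pv_pyRange_nodup (a b s : Int) (hs : 0 < s) :
    (PySem.List.pyRange a b s).Nodup := by
  rw [PySem.List.pyRange_of_pos a b hs]
  apply List.Nodup.map ?_ List.nodup_range
  intro x y h
  have h2 : s * (x : Int) = s * (y : Int) := by linarith
  have h3 : (x : Int) = (y : Int) := mul_left_cancel₀ (by omega) h2
  exact_mod_cast h3

theorem pv_dvd_sub_self (d a : Int) : d ∣ a - d ↔ d ∣ a := by
  constructor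
  · intro h
    have := dvd_add h (dvd_refl d)
    simpa using this
  · intro h
    exact dvd_sub h (dvd_refl d)

theorem pv_get_const_nil (n a : Int) (ha : 0 ≤ a) :
    PySem.List.pyGetD ((PySem.List.pyRange 0 n 1).map (fun _ => ([] : List Int))) a [] = [] := by
  have ha' : a = ((a.toNat : Nat) : Int) := (Int.toNat_of_nonneg ha).symm
  rw [ha', PySem.List.pyGetD_natCast]
  have := List.getD_map (n := a.toNat) (PySem.List.pyRange 0 n 1) (0 : Int)
    (fun _ => ([] : List Int))
  simpa using this

theorem pv_outer_sieve (k : Int) :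
    ∀ (l : List Int) (divs : List (List Int)),
      (divs.length : Int) = k + 1 →
      (∀ d ∈ l, 1 ≤ d) →
      ∀ a, 1 ≤ a → a ≤ k → ∀ x,
      (x ∈ PySem.List.pyGetD (l.foldl (fun divs d =>
          (PySem.List.pyRange d (k + 1) d).foldl (fun divs mlt =>
            PySem.List.pySetD divs mlt (PySem.List.pyGetD divs mlt [] ++ [d])) divs) divs) a []
        ↔ (x ∈ PySem.List.pyGetD divs a [] ∨ (x ∈ l ∧ x ∣ a))) := by
  intro l
  induction l with
  | nil => intro divs _ _ a _ _ x; simp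
  | cons d l ih =>
    intro divs hlen hpos a ha1 hak x
    have hd1 : 1 ≤ d := hpos d List.mem_cons_self
    rw [List.foldl_cons]
    rw [ih _ (by rw [pv_inner_sieve_len]; exact hlen)
      (fun y hy => hpos y (List.mem_cons_of_mem d hy)) a ha1 hak x]
    rw [pv_inner_sieve_get d _ divs a (pv_pyRange_nodup d (k + 1) d (by omega))
      (fun y hy => by
        obtain ⟨h1, h2, _⟩ := (PySem.List.mem_pyRange_iff_of_pos (by omega) y).mp hy
        exact ⟨by omega, by omega⟩)
      (by omega)]
    have hmem : a ∈ PySem.List.pyRange d (k + 1) d ↔ d ∣ a := by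
      rw [PySem.List.mem_pyRange_iff_of_pos (by omega)]
      constructor
      · rintro ⟨-, -, h⟩
        exact (pv_dvd_sub_self d a).mp h
      · intro h
        exact ⟨Int.le_of_dvd (by omega) h, by omega, (pv_dvd_sub_self d a).mpr h⟩
    by_cases hda : d ∣ a
    · rw [if_pos (hmem.mpr hda)]
      simp only [List.mem_append, List.mem_cons, List.not_mem_nil, or_false]
      constructor
      · rintro ((h | rfl) | h)
        · exact Or.inl h
        · exact Or.inr ⟨Or.inl rfl, hda⟩
        · exact Or.inr ⟨Or.inr h.1, h.2⟩
      · rintro (h | ⟨(rfl | h), hxa⟩)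
        · exact Or.inl (Or.inl h)
        · exact Or.inl (Or.inr rfl)
        · exact Or.inr ⟨h, hxa⟩
    · rw [if_neg (fun h => hda (hmem.mp h))]
      simp only [List.append_nil, List.mem_cons]
      constructor
      · rintro (h | h)
        · exact Or.inl h
        · exact Or.inr ⟨Or.inr h.1, h.2⟩
      · rintro (h | ⟨(rfl | h), hxa⟩)
        · exact Or.inl h
        · exact absurd hxa hda
        · exact Or.inr ⟨h, hxa⟩

theorem pv_sieve_mem (k a : Int) (ha1 : 1 ≤ a) (hak : a ≤ k) (x : Int) :
    x ∈ pvDGet k a ↔ 1 ≤ x ∧ x ∣ a := by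
  unfold pvDGet pvDSieve
  rw [pv_outer_sieve k (PySem.List.pyRange 1 (k + 1) 1) _
    (by
      rw [List.length_map, PySem.List.length_pyRange_one]
      omega)
    (fun y hy => (PySem.List.mem_pyRange_one.mp hy).1) a ha1 hak x]
  rw [pv_get_const_nil (k + 1) a (by omega)]
  simp only [List.not_mem_nil, false_or, PySem.List.mem_pyRange_one]
  constructor
  · rintro ⟨⟨h1, _⟩, h2⟩
    exact ⟨h1, h2⟩
  · rintro ⟨h1, h2⟩
    exact ⟨⟨h1, by have := Int.le_of_dvd (by omega) h2; omega⟩, h2⟩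

-- ----- every divisor of a² is a product of two divisors of a -----

theorem pv_div_sq_nat (d n : ℕ) (hn : 0 < n) (hdvd : d ∣ n * n) :
    ∃ u v : ℕ, u ∣ n ∧ v ∣ n ∧ d = u * v := by
  have hg : 0 < Nat.gcd d n := Nat.gcd_pos_of_pos_right _ hn
  have hco : (d / Nat.gcd d n).Coprime (n / Nat.gcd d n) := Nat.coprime_div_gcd_div_gcd hg
  have hdg : Nat.gcd d n * (d / Nat.gcd d n) = d := Nat.mul_div_cancel' (Nat.gcd_dvd_left d n)
  have hng : Nat.gcd d n * (n / Nat.gcd d n) = n := Nat.mul_div_cancel' (Nat.gcd_dvd_right d n)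
  have h1 : d / Nat.gcd d n ∣ (n / Nat.gcd d n) * n := by
    have h2 : Nat.gcd d n * (d / Nat.gcd d n) ∣ Nat.gcd d n * ((n / Nat.gcd d n) * n) := by
      rw [hdg, ← mul_assoc, hng]
      exact hdvd
    exact (mul_dvd_mul_iff_left (by omega : Nat.gcd d n ≠ 0)).mp h2
  have h2 : d / Nat.gcd d n ∣ n := hco.dvd_of_dvd_mul_left h1
  exact ⟨Nat.gcd d n, d / Nat.gcd d n, Nat.gcd_dvd_right d n, h2, hdg.symm⟩

theorem pv_div_sq (d a : Int) (ha : 1 ≤ a) (hd : 1 ≤ d) (hdvd : d ∣ a * a) :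
    ∃ u v : Int, 1 ≤ u ∧ 1 ≤ v ∧ u ∣ a ∧ v ∣ a ∧ d = u * v := by
  have hN : d.natAbs ∣ a.natAbs * a.natAbs := by
    have := Int.natAbs_dvd_natAbs.mpr hdvd
    rwa [Int.natAbs_mul] at this
  obtain ⟨u, v, hu, hv, hduv⟩ := pv_div_sq_nat d.natAbs a.natAbs (by omega) hN
  have hu0 : 0 < u := Nat.pos_of_dvd_of_pos hu (by omega)
  have hv0 : 0 < v := Nat.pos_of_dvd_of_pos hv (by omega)
  have haeq : ((a.natAbs : Nat) : Int) = a := Int.natAbs_of_nonneg (by omega)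
  have hdeq : ((d.natAbs : Nat) : Int) = d := Int.natAbs_of_nonneg (by omega)
  refine ⟨(u : Int), (v : Int), by exact_mod_cast hu0, by exact_mod_cast hv0, ?_, ?_, ?_⟩
  · rw [← haeq]; exact_mod_cast hu
  · rw [← haeq]; exact_mod_cast hv
  · rw [← hdeq]; exact_mod_cast hduv

theorem pv_prod_mem (k a : Int) (ha1 : 1 ≤ a) (hak : a ≤ k) (x : Int) :
    x ∈ pvProd k a ↔ 1 ≤ x ∧ x ∣ a * a := by
  unfold pvProd
  rw [PySem.Set.mem_ofList]
  simp only [List.mem_flatMap, List.mem_map]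
  constructor
  · rintro ⟨u, hu, v, hv, rfl⟩
    obtain ⟨hu1, hud⟩ := (pv_sieve_mem k a ha1 hak u).mp hu
    obtain ⟨hv1, hvd⟩ := (pv_sieve_mem k a ha1 hak v).mp hv
    exact ⟨by nlinarith, mul_dvd_mul hud hvd⟩
  · rintro ⟨hx1, hxd⟩
    obtain ⟨u, v, hu1, hv1, hud, hvd, rfl⟩ := pv_div_sq x a ha1 hx1 hxd
    exact ⟨u, (pv_sieve_mem k a ha1 hak u).mpr ⟨hu1, hud⟩,
      v, (pv_sieve_mem k a ha1 hak v).mpr ⟨hv1, hvd⟩, rfl⟩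

-- ----- contribution of one divisor ↔ one grid cell -----

theorem pv_root_eq (a bc c : Int) (hc : 0 ≤ c) (hcc : c * c = a * a + bc * bc) :
    pvRoot a bc = c := by
  unfold pvRoot
  rw [← hcc]
  have hc' : c = ((c.toNat : Nat) : Int) := (Int.toNat_of_nonneg hc).symm
  rw [hc']
  have : (((c.toNat : Nat) : Int) * ((c.toNat : Nat) : Int)).toNat = c.toNat * c.toNat := by
    omega
  rw [this, ← pow_two, Nat.sqrt_eq']

theorem pv_fwd (k a d : Int) (ha1 : 1 ≤ a) (hak : a ≤ k) (hd1 : 1 ≤ d)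
    (hdvd : d ∣ a * a) (hne : pvContrib a d ≠ 0) :
    2 ≤ (a * a / d - d) / 2 ∧ (a * a / d - d) / 2 ≤ 2 * a ∧
    pvT k a ((a * a / d - d) / 2) = pvContrib a d ∧
    pvT k a ((a * a / d - d) / 2) ≠ 0 ∧
    pvRoot a ((a * a / d - d) / 2) - (a * a / d - d) / 2 = d := by
  unfold pvContrib at hne ⊢
  simp only [PySem.Int.floordiv_eq_ediv_of_pos (show (0:Int) < 2 by norm_num),
    PySem.Int.floordiv_eq_ediv_of_pos (show (0:Int) < d by omega),
    PySem.Int.mod_eq_zero_iff_dvd] at hne ⊢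
  by_cases h1 : d < a * a / d ∧ 2 ∣ a * a / d - d
  · rw [if_pos h1] at hne ⊢
    by_cases h2 : 2 ≤ (a * a / d - d) / 2 ∧ (a * a / d - d) / 2 ≤ 2 * a
    · rw [if_pos h2] at hne ⊢
      obtain ⟨hlt, heven⟩ := h1
      obtain ⟨hbc2, hbc2a⟩ := h2
      have hde : d * (a * a / d) = a * a := Int.mul_ediv_cancel' hdvd
      have hbc2' : 2 * ((a * a / d - d) / 2) = a * a / d - d := Int.mul_ediv_cancel' heven
      set bc := (a * a / d - d) / 2 with hbcdef
      set c := d + bc with hcdef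
      have he : a * a / d = d + 2 * bc := by omega
      rw [he] at hde
      have hccq : c * c = a * a + bc * bc := by
        rw [hcdef]
        linear_combination hde
      have hsqP : pvSqP k (a * a + bc * bc) :=
        (pv_sq_iff k a bc ha1 hak hbc2 hbc2a).mp ⟨c, by omega, hccq⟩
      have hT : pvT k a bc = pvF a bc := by
        unfold pvT
        rw [if_pos ⟨ha1, hak, hbc2, hbc2a, hsqP⟩]
      have hroot : pvRoot a bc = c := pv_root_eq a bc c (by omega) hccq
      refine ⟨hbc2, hbc2a, ?_, ?_, by omega⟩
      · rw [hT]; unfold pvF; rfl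
      · rw [hT]; unfold pvF; split <;> omega
    · rw [if_neg h2] at hne
      exact absurd rfl hne
  · rw [if_neg h1] at hne
    exact absurd rfl hne

theorem pv_bwd (k a bc : Int) (ha1 : 1 ≤ a) (hak : a ≤ k) (hbc2 : 2 ≤ bc)
    (hbc2a : bc ≤ 2 * a) (hne : pvT k a bc ≠ 0) :
    1 ≤ pvRoot a bc - bc ∧ (pvRoot a bc - bc) ∣ a * a ∧
    (a * a / (pvRoot a bc - bc) - (pvRoot a bc - bc)) / 2 = bc ∧
    pvContrib a (pvRoot a bc - bc) ≠ 0 := by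
  have g := pvT_ne_zero_guard hne
  obtain ⟨c, hc1, hccq⟩ := (pv_sq_iff k a bc ha1 hak hbc2 hbc2a).mpr g.2.2.2.2
  have hroot : pvRoot a bc = c := pv_root_eq a bc c (by omega) hccq
  have hcgt : bc < c := by nlinarith
  have hfact : (c - bc) * (c + bc) = a * a := by linear_combination hccq
  have he : a * a / (c - bc) = c + bc := by
    rw [← hfact]
    exact Int.mul_ediv_cancel_left _ (by omega)
  have hcon : pvContrib a (c - bc) ≠ 0 := by
    unfold pvContrib
    simp only [PySem.Int.floordiv_eq_ediv_of_pos (show (0:Int) < 2 by norm_num),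
      PySem.Int.floordiv_eq_ediv_of_pos (show (0:Int) < c - bc by omega),
      PySem.Int.mod_eq_zero_iff_dvd]
    rw [he]
    rw [if_pos ⟨by omega, ⟨bc, by omega⟩⟩]
    rw [show (c + bc - (c - bc)) / 2 = bc by omega]
    rw [if_pos ⟨hbc2, hbc2a⟩]
    split <;> omega
  rw [hroot]
  exact ⟨by omega, ⟨c + bc, hfact.symm⟩, by rw [he]; omega, hcon⟩

theorem pv_inner_sum (k a : Int) (ha1 : 1 ≤ a) (hak : a ≤ k) :
    ((pvProd k a).map (fun d => pvContrib a d)).sum =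
      ∑ bc ∈ Finset.Icc (2:Int) (2 * a), pvT k a bc := by
  have hnd : (pvProd k a).Nodup := by unfold pvProd; exact PySem.Set.nodup_ofList _
  rw [← List.sum_toFinset _ hnd]
  rw [← Finset.sum_filter_ne_zero ((pvProd k a).toFinset)]
  rw [← Finset.sum_filter_ne_zero (Finset.Icc (2:Int) (2 * a))]
  apply Finset.sum_nbij' (fun d => (a * a / d - d) / 2) (fun bc => pvRoot a bc - bc)
  · intro d hd
    rw [Finset.mem_filter, List.mem_toFinset] at hd
    obtain ⟨hd1, hdvd⟩ := (pv_prod_mem k a ha1 hak d).mp hd.1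
    have F := pv_fwd k a d ha1 hak hd1 hdvd hd.2
    rw [Finset.mem_filter, Finset.mem_Icc]
    exact ⟨⟨F.1, F.2.1⟩, F.2.2.2.1⟩
  · intro bc hbc
    rw [Finset.mem_filter, Finset.mem_Icc] at hbc
    have B := pv_bwd k a bc ha1 hak hbc.1.1 hbc.1.2 hbc.2
    rw [Finset.mem_filter, List.mem_toFinset]
    exact ⟨(pv_prod_mem k a ha1 hak _).mpr ⟨B.1, B.2.1⟩, B.2.2.2⟩
  · intro d hd
    rw [Finset.mem_filter, List.mem_toFinset] at hd
    obtain ⟨hd1, hdvd⟩ := (pv_prod_mem k a ha1 hak d).mp hd.1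
    exact (pv_fwd k a d ha1 hak hd1 hdvd hd.2).2.2.2.2
  · intro bc hbc
    rw [Finset.mem_filter, Finset.mem_Icc] at hbc
    exact (pv_bwd k a bc ha1 hak hbc.1.1 hbc.1.2 hbc.2).2.2.1
  · intro d hd
    rw [Finset.mem_filter, List.mem_toFinset] at hd
    obtain ⟨hd1, hdvd⟩ := (pv_prod_mem k a ha1 hak d).mp hd.1
    exact (pv_fwd k a d ha1 hak hd1 hdvd hd.2).2.2.1.symm

theorem pv_B_eq (k : Int) :
    create_cuboids_alt k = ∑ x ∈ Finset.Icc (1:Int) k ×ˢ Finset.Icc (2:Int) (2 * k), pvT k x.1 x.2 := by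
  rw [Finset.sum_product']
  have hstep0 : create_cuboids_alt k =
      (PySem.List.pyRange 1 (k + 1) 1).foldl (fun total a =>
        (pvProd k a).foldl (fun total d =>
          let e := PySem.Int.floordiv (a * a) d
          if d < e ∧ PySem.Int.mod (e - d) 2 = 0 then
            let bc := PySem.Int.floordiv (e - d) 2
            if 2 ≤ bc ∧ bc ≤ 2 * a then
              total + (if bc ≤ a then PySem.Int.floordiv bc 2
                       else a - PySem.Int.floordiv (bc - 1) 2)
            else total
          else total) total) 0 := rfl
  rw [hstep0]
  have hbody : ∀ (a : Int), (fun (total d : Int) =>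
      let e := PySem.Int.floordiv (a * a) d
      if d < e ∧ PySem.Int.mod (e - d) 2 = 0 then
        let bc := PySem.Int.floordiv (e - d) 2
        if 2 ≤ bc ∧ bc ≤ 2 * a then
          total + (if bc ≤ a then PySem.Int.floordiv bc 2
                   else a - PySem.Int.floordiv (bc - 1) 2)
        else total
      else total) = (fun (total d : Int) => total + pvContrib a d) := by
    intro a
    funext total d
    unfold pvContrib
    dsimp only
    split_ifs <;> omega
  rw [PySem.List.foldl_congr_mem (PySem.List.pyRange 1 (k + 1) 1) _
      (fun total a => total + ((pvProd k a).map (fun d => pvContrib a d)).sum) 0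
    (by
      intro acc x hx
      dsimp only
      rw [hbody x]
      exact PySem.List.foldl_add _ _ acc)]
  rw [PySem.List.foldl_congr_mem (PySem.List.pyRange 1 (k + 1) 1) _
      (fun total a => total + ∑ bc ∈ Finset.Icc (2:Int) (2 * a), pvT k a bc) 0
    (by
      intro acc x hx
      obtain ⟨hx1, hx2⟩ := PySem.List.mem_pyRange_one.mp hx
      rw [pv_inner_sum k x hx1 (by omega)])]
  rw [PySem.List.foldl_add, zero_add, pv_sum_range,
    show (k + 1 - 1 : Int) = k by ring]
  apply Finset.sum_congr rfl
  intro a ha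
  obtain ⟨ha1, hak⟩ := Finset.mem_Icc.mp ha
  rw [← Finset.sum_subset (Finset.Icc_subset_Icc_right (by omega) :
        Finset.Icc (2:Int) (2 * a) ⊆ Finset.Icc (2:Int) (2 * k))]
  intro x hx hnx
  unfold pvT
  rw [if_neg]
  rintro ⟨h1, h2, h3, h4, h5⟩
  simp only [Finset.mem_Icc] at hx hnx
  omega

-- ===== VERDICT (by name: the statement is the Claim_ definition above) =====
theorem create_cuboids_spec : Claim_equal_create_cuboids := by
  intro k _
  unfold Spec_create_cuboids
  rw [pv_A_eq k, pv_B_eq k]
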